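-- pv_equiv track=rewrite | github.com/phoenix9373/Algorithm | 4579.py | check
-- ===== SOURCE A (Python) =====
-- def check(text):
--     if len(text) < 2:
--         return 'Exist'
--     if text[0] == '*' or text[-1] == '*':
--         return 'Exist'
--     if text[0] == text[-1]:
--         if text[1] == '*' or text[-2] == '*':
--             return 'Exist'
--         return check(text[1:-1])
--     else:
--         return 'Not exist'
-- ===== SOURCE B (Python) =====
-- def check(text):
--     i, j = 0, len(text) - 1
--     while i < j:
--         if text[i] == '*' or text[j] == '*':
--             return 'Exist'
--         if text[i] != text[j]:
--             return 'Not exist'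
--         i += 1
--         j -= 1
--     return 'Exist'
-- ===== Notes on version B (the rewrite author's own statement) =====
-- stated objective: faster
-- what changed: Replaces the recursive slice-and-recheck (each step copies text[1:-1]) by a single two-pointer inward scan over the original string; the redundant lookahead star test disappears.
import Mathlib
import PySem

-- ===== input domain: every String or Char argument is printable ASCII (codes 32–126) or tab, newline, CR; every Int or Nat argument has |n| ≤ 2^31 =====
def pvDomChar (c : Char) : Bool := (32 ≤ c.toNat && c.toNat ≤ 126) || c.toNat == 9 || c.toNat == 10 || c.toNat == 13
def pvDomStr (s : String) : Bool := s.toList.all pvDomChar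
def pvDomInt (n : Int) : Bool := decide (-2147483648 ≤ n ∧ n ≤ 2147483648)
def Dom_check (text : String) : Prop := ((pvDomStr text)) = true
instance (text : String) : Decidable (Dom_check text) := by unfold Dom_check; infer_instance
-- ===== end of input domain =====

-- B replaces A's recursive slice-and-recheck (which copies text[1:-1] at every step) by a
-- single two-pointer inward scan over the original string (measured faster in a timing run).

-- ===== PORT A =====
-- literal transliteration of A's recursion, on the character list; indexing via pyGet?
-- (always in range here because len(text) < 2 is checked first, exactly as in the Python)
def checkGo (l : List Char) : String :=
  if _h : l.length < 2 then "Exist"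
  else if PySem.List.pyGet? l 0 == some '*' || PySem.List.pyGet? l (-1) == some '*' then "Exist"
  else if PySem.List.pyGet? l 0 == PySem.List.pyGet? l (-1) then
    if PySem.List.pyGet? l 1 == some '*' || PySem.List.pyGet? l (-2) == some '*' then "Exist"
    else checkGo (PySem.List.slice l (some 1) (some (-1)))
  else "Not exist"
termination_by l.length
decreasing_by
  simp [PySem.List.length_slice]
  omega

def check (text : String) : String := checkGo text.toList

-- ===== PORT B =====
-- literal transliteration of Source B's while-loop: i, j move inward over the unchanged string;
-- text[i] / text[j] are always in range when i < j <= len-1, so getD with a dummy default is exact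
def checkAltGo (l : List Char) (i j : Nat) : String :=
  if _h : i < j then
    if l.getD i ' ' == '*' || l.getD j ' ' == '*' then "Exist"
    else if l.getD i ' ' != l.getD j ' ' then "Not exist"
    else checkAltGo l (i + 1) (j - 1)
  else "Exist"
termination_by j - i

def check_alt (text : String) : String := checkAltGo text.toList 0 (text.toList.length - 1)

-- ===== PRECONDITION & SPEC =====
def Spec_check (text : String) (out : String) : Prop := out = check_alt text
instance (text : String) (out : String) : Decidable (Spec_check text out) := by unfold Spec_check; infer_instance

-- ===== CLAIM (what is proved, stated in full; the proofs are below) =====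
def Claim_equal_check : Prop := ∀ (text : String), Dom_check text → Spec_check text (check text)

-- ===== LEMMAS AND PROOFS =====

lemma checkGo_short (m : List Char) (h : m.length < 2) : checkGo m = "Exist" := by
  rw [checkGo, dif_pos h]

lemma checkGo_star (m : List Char)
    (h : (PySem.List.pyGet? m 0 == some '*' || PySem.List.pyGet? m (-1) == some '*') = true) :
    checkGo m = "Exist" := by
  rw [checkGo]
  by_cases h1 : m.length < 2
  · rw [dif_pos h1]
  · rw [dif_neg h1, if_pos h]

lemma slice_mid (m : List Char) (h : 2 ≤ m.length) :
    PySem.List.slice m (some 1) (some (-1)) = (m.drop 1).take (m.length - 2) := by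
  simp only [PySem.List.slice, Int.reduceNeg, Order.lt_one_iff, PySem.List.clampIdx_neg_ofNat,
    zero_le_one, PySem.List.clampIdx_of_nonneg, Int.toNat_one]
  rw [min_eq_left (by omega)]
  congr 1

theorem key (n : Nat) : ∀ (l : List Char) (i j : Nat), j < l.length → j - i ≤ n →
    checkAltGo l i j = checkGo ((l.drop i).take (j + 1 - i)) := by
  induction n with
  | zero =>
    intro l i j hj hn
    rw [checkAltGo, dif_neg (by omega), checkGo_short _ (by simp; omega)]
  | succ n ih =>
    intro l i j hj hn
    by_cases hij : i < j
    · have hil : i < l.length := by omega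
      set m := (l.drop i).take (j + 1 - i) with hm
      have hmlen : m.length = j + 1 - i := by simp [hm]; omega
      have hg : ∀ k, k < j + 1 - i → m[k]? = l[i + k]? := by
        intro k hk
        rw [hm, List.getElem?_take_of_lt hk, List.getElem?_drop]
      have h0 : PySem.List.pyGet? m 0 = l[i]? := by
        rw [PySem.List.pyGet?_of_nonneg m (i := 0) (by norm_num)]
        simpa using hg 0 (by omega)
      have h1 : PySem.List.pyGet? m 1 = l[i + 1]? := by
        rw [PySem.List.pyGet?_of_nonneg m (i := 1) (by norm_num)]
        simpa using hg 1 (by omega)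
      have hlast : PySem.List.pyGet? m (-1) = l[j]? := by
        rw [PySem.List.pyGet?_neg_one, List.getLast?_eq_getElem?, hmlen,
          show j + 1 - i - 1 = j - i by omega]
        rw [hg (j - i) (by omega), show i + (j - i) = j by omega]
      have h2 : PySem.List.pyGet? m (-2) = l[j - 1]? := by
        rw [show (-2 : Int) = -((2 : Nat) : Int) by norm_num,
          PySem.List.pyGet?_neg_natCast m 2 (by omega) (by omega), hmlen,
          show j + 1 - i - 2 = j - i - 1 by omega]
        rw [hg (j - i - 1) (by omega), show i + (j - i - 1) = j - 1 by omega]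
      have la : l[i]? = some (l[i]'hil) := List.getElem?_eq_getElem hil
      have lb : l[j]? = some (l[j]'hj) := List.getElem?_eq_getElem hj
      rw [checkAltGo, dif_pos hij, checkGo, dif_neg (by omega)]
      rw [h0, hlast, la, lb]
      rw [List.getD_eq_getElem?_getD, List.getD_eq_getElem?_getD, la, lb]
      simp only [Option.getD_some]
      by_cases hia : l[i]'hil = '*'
      · simp [hia]
      by_cases hja : l[j]'hj = '*'
      · simp [hja]
      by_cases hab : l[i]'hil = l[j]'hj
      · simp only [hja, hab, beq_self_eq_true, bne_self_eq_false, Bool.or_self,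
          Bool.false_eq_true, if_false, if_true, beq_iff_eq]
        rw [if_neg (by simp [hja])]
        have hrec := ih l (i + 1) (j - 1) (by omega) (by omega)
        rw [hrec, show j - 1 + 1 - (i + 1) = j - i - 1 by omega]
        set m' := (l.drop (i + 1)).take (j - i - 1) with hm'
        have hslice : PySem.List.slice m (some 1) (some (-1)) = m' := by
          rw [slice_mid m (by omega), hmlen, hm, List.drop_take]
          rw [show j + 1 - i - 1 = j - i by omega, List.drop_drop, List.take_take]
          rw [show j + 1 - i - 2 = j - i - 1 by omega, min_eq_left (by omega)]
        by_cases hstar2 : (l[i + 1]'(by omega) = '*') ∨ (l[j - 1]'(by omega) = '*')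
        · have hA : (PySem.List.pyGet? m 1 == some '*' || PySem.List.pyGet? m (-2) == some '*') = true := by
            rw [h1, h2, List.getElem?_eq_getElem (by omega : i + 1 < l.length),
              List.getElem?_eq_getElem (by omega : j - 1 < l.length)]
            rcases hstar2 with h' | h' <;> simp [h']
          rw [if_pos hA]
          have hji : i + 2 ≤ j := by
            by_contra hcon
            have hji1 : j = i + 1 := by omega
            subst hji1
            rcases hstar2 with h' | h'
            · exact hja h'
            · exact hia (by simpa using h')
          by_cases hj2 : j = i + 2
          · exact checkGo_short m' (by simp [hm']; omega)
          · refine checkGo_star m' ?_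
            have h0' : PySem.List.pyGet? m' 0 = some (l[i + 1]'(by omega)) := by
              rw [PySem.List.pyGet?_of_nonneg m' (i := 0) (by norm_num), hm']
              simp only [Int.toNat_zero, List.getElem?_take_of_lt (by omega : 0 < j - i - 1),
                List.getElem?_drop, Nat.add_zero]
              exact List.getElem?_eq_getElem (by omega)
            have hm'len : m'.length = j - i - 1 := by simp [hm']; omega
            have hl' : PySem.List.pyGet? m' (-1) = some (l[j - 1]'(by omega)) := by
              rw [PySem.List.pyGet?_neg_one, List.getLast?_eq_getElem?, hm'len, hm']
              rw [List.getElem?_take_of_lt (by omega), List.getElem?_drop,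
                show i + 1 + (j - i - 1 - 1) = j - 1 by omega]
              exact List.getElem?_eq_getElem (by omega)
            rw [h0', hl']
            rcases hstar2 with h' | h' <;> simp [h']
        · push_neg at hstar2
          obtain ⟨hc, hd⟩ := hstar2
          have hA : (PySem.List.pyGet? m 1 == some '*' || PySem.List.pyGet? m (-2) == some '*') = false := by
            rw [h1, h2, List.getElem?_eq_getElem (by omega : i + 1 < l.length),
              List.getElem?_eq_getElem (by omega : j - 1 < l.length)]
            simp [hc, hd]
          rw [if_neg (by simp [hA]), hslice]
      · simp [hia, hja, hab]
    · rw [checkAltGo, dif_neg hij, checkGo_short _ (by simp; omega)]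

-- ===== VERDICT (by name: the statement is the Claim_ definition above) =====
theorem check_spec : Claim_equal_check := by
  intro text _
  unfold Spec_check check check_alt
  rcases h : text.toList with _ | ⟨c, t⟩
  · simp [checkAltGo, checkGo]
  · have := key (t.length) (c :: t) 0 ((c :: t).length - 1) (by simp) (by simp)
    simp at this ⊢
    rw [this]
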